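-- pv_equiv track=rewrite | github.com/yassine-ta/credhunt_ml | CredHunt-ML/generate_value_for_pattern.py | get_type_from_label
-- ===== SOURCE A (Python) =====
-- def get_type_from_label(label: str) -> str:
--     """
--     Determine the credential type based on the label/prefix used
--     """
--     lower_label = label.lower()
--     if any(k in lower_label for k in ["passwd", "pwd", "passcode", "password"]):
--         return "Password"
--     elif "bearer" in lower_label:
--         return "BearerToken"
--     elif "token" in lower_label:
--         return "Token"
--     elif any(k in lower_label for k in ["api_key", "apikey", "api-key"]):
--         return "APIKey"
--     elif any(k in lower_label for k in ["private_key", "rsa", "ecdsa", "ssh"]):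
--         return "PrivateKey"
--     elif any(k in lower_label for k in ["url", "ftp", "smtp", "postgresql", "sql", "mongodb"]):
--         return "URL"
--     else:
--         return "Other"
-- ===== SOURCE B (Python) =====
-- # Positional scan: walk the lowered label once; at each position record the
-- # highest-priority keyword that starts there; map the best priority to its type.
-- _TYPES = ["Password", "BearerToken", "Token", "APIKey", "PrivateKey", "URL"]
-- _KW = [
--     ("passwd", 0), ("pwd", 0), ("passcode", 0), ("password", 0),
--     ("bearer", 1),
--     ("token", 2),
--     ("api_key", 3), ("apikey", 3), ("api-key", 3),
--     ("private_key", 4), ("rsa", 4), ("ecdsa", 4), ("ssh", 4),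
--     ("url", 5), ("ftp", 5), ("smtp", 5), ("postgresql", 5), ("sql", 5), ("mongodb", 5),
-- ]
--
--
-- def get_type_from_label(label: str) -> str:
--     s = label.lower()
--     best = 6
--     for i in range(len(s)):
--         for kw, pri in _KW:
--             if pri < best and s.startswith(kw, i):
--                 best = pri
--     return _TYPES[best] if best < 6 else "Other"
-- ===== Notes on version B (the rewrite author's own statement) =====
-- stated objective: alternative
-- what changed: Instead of testing the six rules one after another with substring searches over the whole label, B makes a single left-to-right positional scan of the lowered label, recording at each position the best (smallest) priority of any keyword starting there, and maps the resulting minimum priority to its type name.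
import Mathlib
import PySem

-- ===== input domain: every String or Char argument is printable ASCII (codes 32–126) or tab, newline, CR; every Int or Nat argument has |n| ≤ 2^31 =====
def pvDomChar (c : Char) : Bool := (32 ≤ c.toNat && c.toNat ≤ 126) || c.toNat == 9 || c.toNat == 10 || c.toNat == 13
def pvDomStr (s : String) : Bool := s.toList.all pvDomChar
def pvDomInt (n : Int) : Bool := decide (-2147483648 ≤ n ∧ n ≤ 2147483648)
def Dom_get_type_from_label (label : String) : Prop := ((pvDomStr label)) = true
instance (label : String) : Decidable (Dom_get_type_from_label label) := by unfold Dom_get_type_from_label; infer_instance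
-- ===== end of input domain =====

-- B replaces A's rule-by-rule cascade of substring tests by a single positional scan of the
-- lowered label that accumulates the best (smallest) matching priority (objective: alternative).

-- ===== PORT A =====
def get_type_from_label (label : String) : String :=
  let lower_label := PySem.Str.lower label
  if ["passwd", "pwd", "passcode", "password"].any (fun k => PySem.Str.isIn k lower_label) then
    "Password"
  else if PySem.Str.isIn "bearer" lower_label then
    "BearerToken"
  else if PySem.Str.isIn "token" lower_label then
    "Token"
  else if ["api_key", "apikey", "api-key"].any (fun k => PySem.Str.isIn k lower_label) then
    "APIKey"
  else if ["private_key", "rsa", "ecdsa", "ssh"].any (fun k => PySem.Str.isIn k lower_label) then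
    "PrivateKey"
  else if ["url", "ftp", "smtp", "postgresql", "sql", "mongodb"].any (fun k => PySem.Str.isIn k lower_label) then
    "URL"
  else
    "Other"

-- ===== PORT B =====
def pvTypes : List String := ["Password", "BearerToken", "Token", "APIKey", "PrivateKey", "URL"]

def kwPri : List (String × Nat) :=
  [("passwd", 0), ("pwd", 0), ("passcode", 0), ("password", 0),
   ("bearer", 1),
   ("token", 2),
   ("api_key", 3), ("apikey", 3), ("api-key", 3),
   ("private_key", 4), ("rsa", 4), ("ecdsa", 4), ("ssh", 4),
   ("url", 5), ("ftp", 5), ("smtp", 5), ("postgresql", 5), ("sql", 5), ("mongodb", 5)]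

-- Python's s.startswith(kw, i) with 0 ≤ i is exactly "kw is a prefix of s[i:]" (ported by hand as
-- List.isPrefixOf on the dropped char list — exact here since i ranges over 0..len-1);
-- _TYPES[best] is only read under the guard best < 6, where List.getD is exact.
def get_type_from_label_alt (label : String) : String :=
  let s := (PySem.Str.lower label).toList
  let best := (List.range s.length).foldl
    (fun best i => kwPri.foldl
      (fun best p => if p.2 < best && p.1.toList.isPrefixOf (s.drop i) then p.2 else best) best) 6
  if best < 6 then pvTypes.getD best "Other" else "Other"

-- ===== PRECONDITION & SPEC =====
def Spec_get_type_from_label (label : String) (out : String) : Prop := out = get_type_from_label_alt label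
instance (label : String) (out : String) : Decidable (Spec_get_type_from_label label out) := by unfold Spec_get_type_from_label; infer_instance

-- ===== CLAIM (what is proved, stated in full; the proofs are below) =====
def Claim_equal_get_type_from_label : Prop := ∀ (label : String), Dom_get_type_from_label label → Spec_get_type_from_label label (get_type_from_label label)

-- ===== LEMMAS AND PROOFS =====

-- The guarded update "if pri < best && c then pri else best" is the min-update "if c then min best pri else best".
theorem foldl_guard_min (l : List (String × Nat)) (c : String × Nat → Bool) :
    ∀ b : Nat, l.foldl (fun b p => if p.2 < b && c p then p.2 else b) b
      = l.foldl (fun b p => if c p then min b p.2 else b) b := by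
  induction l with
  | nil => intro b; rfl
  | cons a t ih =>
    intro b
    simp only [List.foldl_cons, ih]
    congr 1
    cases c a
    · simp
    · simp only [Bool.and_true]
      split_ifs with h <;> simp only [decide_eq_true_eq] at h <;> omega

-- A conditional min-fold is a plain min-fold over the filtered priorities.
theorem foldl_min_filter (l : List (String × Nat)) (c : String × Nat → Bool) :
    ∀ b : Nat, l.foldl (fun b p => if c p then min b p.2 else b) b
      = ((l.filter c).map Prod.snd).foldl min b := by
  induction l with
  | nil => intro b; rfl
  | cons a t ih =>
    intro b
    cases hc : c a <;> simp [List.foldl_cons, hc, ih]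

-- Folding min group-by-group equals folding min over the flattened list.
theorem foldl_foldl_min (I : List Nat) (g : Nat → List Nat) :
    ∀ b : Nat, I.foldl (fun b i => (g i).foldl min b) b = (I.flatMap g).foldl min b := by
  induction I with
  | nil => intro b; rfl
  | cons i t ih => intro b; simp [List.foldl_cons, ih, List.foldl_append]

theorem foldl_min_le_iff (L : List Nat) :
    ∀ b k : Nat, (L.foldl min b ≤ k ↔ b ≤ k ∨ ∃ x ∈ L, x ≤ k) := by
  induction L with
  | nil => intro b k; simp
  | cons a t ih =>
    intro b k
    simp only [List.foldl_cons, ih, List.mem_cons, min_le_iff]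
    constructor
    · rintro ((h | h) | ⟨x, hx, hxk⟩)
      · exact Or.inl h
      · exact Or.inr ⟨a, Or.inl rfl, h⟩
      · exact Or.inr ⟨x, Or.inr hx, hxk⟩
    · rintro (h | ⟨x, (rfl | hx), hxk⟩)
      · exact Or.inl (Or.inl h)
      · exact Or.inl (Or.inr hxk)
      · exact Or.inr ⟨x, hx, hxk⟩

-- A nonempty keyword that is a prefix of some suffix of s starts at a position below s.length.
theorem exists_pos_iff_isIn (kw s : List Char) (hk : kw ≠ []) :
    (∃ i, i ∈ List.range s.length ∧ kw.isPrefixOf (s.drop i) = true)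
      ↔ PySem.Chars.isIn kw s = true := by
  rw [← PySem.Chars.exists_prefix_drop_iff_isIn]
  constructor
  · rintro ⟨i, _, h⟩
    exact ⟨i, List.isPrefixOf_iff_prefix.mp h⟩
  · rintro ⟨j, h⟩
    by_cases hj : j < s.length
    · exact ⟨j, List.mem_range.mpr hj, List.isPrefixOf_iff_prefix.mpr h⟩
    · exfalso
      have : s.drop j = [] := List.drop_eq_nil_of_le (by omega)
      rw [this] at h
      exact hk (List.prefix_nil.mp h)

-- kwPri entries with priority ≤ k, sliced group by group.
theorem kwPri_le0 (f : String → Bool) :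
    (∃ p ∈ kwPri, p.2 ≤ 0 ∧ f p.1 = true) ↔
      (["passwd", "pwd", "passcode", "password"].any f = true) := by
  simp [kwPri]; try tauto

theorem kwPri_le1 (f : String → Bool) :
    (∃ p ∈ kwPri, p.2 ≤ 1 ∧ f p.1 = true) ↔
      (["passwd", "pwd", "passcode", "password"].any f = true ∨ f "bearer" = true) := by
  simp [kwPri]; try tauto

theorem kwPri_le2 (f : String → Bool) :
    (∃ p ∈ kwPri, p.2 ≤ 2 ∧ f p.1 = true) ↔
      (["passwd", "pwd", "passcode", "password"].any f = true ∨ f "bearer" = true ∨ f "token" = true) := by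
  simp [kwPri]; try tauto

theorem kwPri_le3 (f : String → Bool) :
    (∃ p ∈ kwPri, p.2 ≤ 3 ∧ f p.1 = true) ↔
      (["passwd", "pwd", "passcode", "password"].any f = true ∨ f "bearer" = true ∨ f "token" = true ∨
       ["api_key", "apikey", "api-key"].any f = true) := by
  simp [kwPri]; try tauto

theorem kwPri_le4 (f : String → Bool) :
    (∃ p ∈ kwPri, p.2 ≤ 4 ∧ f p.1 = true) ↔
      (["passwd", "pwd", "passcode", "password"].any f = true ∨ f "bearer" = true ∨ f "token" = true ∨
       ["api_key", "apikey", "api-key"].any f = true ∨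
       ["private_key", "rsa", "ecdsa", "ssh"].any f = true) := by
  simp [kwPri]; try tauto

theorem kwPri_le5 (f : String → Bool) :
    (∃ p ∈ kwPri, p.2 ≤ 5 ∧ f p.1 = true) ↔
      (["passwd", "pwd", "passcode", "password"].any f = true ∨ f "bearer" = true ∨ f "token" = true ∨
       ["api_key", "apikey", "api-key"].any f = true ∨
       ["private_key", "rsa", "ecdsa", "ssh"].any f = true ∨
       ["url", "ftp", "smtp", "postgresql", "sql", "mongodb"].any f = true) := by
  simp [kwPri]; try tauto

-- The heart of the equivalence, stated on the lowered character list.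
theorem core_eq (cs : List Char) :
    (if ["passwd", "pwd", "passcode", "password"].any (fun k => PySem.Chars.isIn k.toList cs) then "Password"
     else if PySem.Chars.isIn "bearer".toList cs then "BearerToken"
     else if PySem.Chars.isIn "token".toList cs then "Token"
     else if ["api_key", "apikey", "api-key"].any (fun k => PySem.Chars.isIn k.toList cs) then "APIKey"
     else if ["private_key", "rsa", "ecdsa", "ssh"].any (fun k => PySem.Chars.isIn k.toList cs) then "PrivateKey"
     else if ["url", "ftp", "smtp", "postgresql", "sql", "mongodb"].any (fun k => PySem.Chars.isIn k.toList cs) then "URL"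
     else "Other")
    = (let best := (List.range cs.length).foldl
          (fun best i => kwPri.foldl
            (fun best p => if p.2 < best && p.1.toList.isPrefixOf (cs.drop i) then p.2 else best) best) 6
       if best < 6 then pvTypes.getD best "Other" else "Other") := by
  have hfun : (fun (b : Nat) (i : Nat) => kwPri.foldl
        (fun b p => if p.2 < b && p.1.toList.isPrefixOf (cs.drop i) then p.2 else b) b)
      = fun b i => ((kwPri.filter (fun p => p.1.toList.isPrefixOf (cs.drop i))).map Prod.snd).foldl min b := by
    funext b i
    rw [foldl_guard_min, foldl_min_filter]
  show _ = (if (List.range cs.length).foldl _ 6 < 6 then _ else _)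
  rw [hfun, foldl_foldl_min]
  set L := (List.range cs.length).flatMap
      (fun i => (kwPri.filter (fun p => p.1.toList.isPrefixOf (cs.drop i))).map Prod.snd) with hL
  set r := L.foldl min 6 with hr
  have hne : ∀ p ∈ kwPri, p.1.toList ≠ [] := by decide
  have hmem : ∀ x, x ∈ L ↔ ∃ p ∈ kwPri, p.2 = x ∧ PySem.Chars.isIn p.1.toList cs = true := by
    intro x
    rw [hL]
    simp only [List.mem_flatMap, List.mem_map, List.mem_filter, List.mem_range]
    constructor
    · rintro ⟨i, hi, p, ⟨hp, hpre⟩, hx⟩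
      exact ⟨p, hp, hx, (exists_pos_iff_isIn _ _ (hne p hp)).mp ⟨i, List.mem_range.mpr hi, hpre⟩⟩
    · rintro ⟨p, hp, hx, hin⟩
      obtain ⟨i, hi, hpre⟩ := (exists_pos_iff_isIn _ _ (hne p hp)).mpr hin
      exact ⟨i, List.mem_range.mp hi, p, ⟨hp, hpre⟩, hx⟩
  have hle : ∀ k, (r ≤ k ↔ 6 ≤ k ∨ ∃ p ∈ kwPri, p.2 ≤ k ∧ PySem.Chars.isIn p.1.toList cs = true) := by
    intro k
    rw [hr, foldl_min_le_iff]
    constructor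
    · rintro (h | ⟨x, hx, hxk⟩)
      · exact Or.inl h
      · obtain ⟨p, hp, hpx, hin⟩ := (hmem x).mp hx
        exact Or.inr ⟨p, hp, by omega, hin⟩
    · rintro (h | ⟨p, hp, hpk, hin⟩)
      · exact Or.inl h
      · exact Or.inr ⟨p.2, (hmem p.2).mpr ⟨p, hp, rfl, hin⟩, hpk⟩
  have e0 := kwPri_le0 (fun k => PySem.Chars.isIn k.toList cs)
  have e1 := kwPri_le1 (fun k => PySem.Chars.isIn k.toList cs)
  have e2 := kwPri_le2 (fun k => PySem.Chars.isIn k.toList cs)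
  have e3 := kwPri_le3 (fun k => PySem.Chars.isIn k.toList cs)
  have e4 := kwPri_le4 (fun k => PySem.Chars.isIn k.toList cs)
  have e5 := kwPri_le5 (fun k => PySem.Chars.isIn k.toList cs)
  by_cases h0 : (["passwd", "pwd", "passcode", "password"].any (fun k => PySem.Chars.isIn k.toList cs)) = true
  · have hru : r = 0 := Nat.le_zero.mp ((hle 0).mpr (Or.inr (e0.mpr h0)))
    simp only [h0, hru]
    simp [pvTypes]
  · by_cases h1 : PySem.Chars.isIn "bearer".toList cs = true
    · have hru : r ≤ 1 := (hle 1).mpr (Or.inr (e1.mpr (Or.inr h1)))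
      have hrl : ¬ r ≤ 0 := fun h => by
        rcases (hle 0).mp h with h6 | hex
        · omega
        · exact h0 (e0.mp hex)
      have hr1 : r = 1 := by omega
      simp only [h0, h1, hr1]
      simp [pvTypes]
    · by_cases h2 : PySem.Chars.isIn "token".toList cs = true
      · have hru : r ≤ 2 := (hle 2).mpr (Or.inr (e2.mpr (Or.inr (Or.inr h2))))
        have hrl : ¬ r ≤ 1 := fun h => by
          rcases (hle 1).mp h with h6 | hex
          · omega
          · rcases e1.mp hex with h | h
            · exact h0 h
            · exact h1 h
        have hr2 : r = 2 := by omega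
        simp only [h0, h1, h2, hr2]
        simp [pvTypes]
      · by_cases h3 : (["api_key", "apikey", "api-key"].any (fun k => PySem.Chars.isIn k.toList cs)) = true
        · have hru : r ≤ 3 := (hle 3).mpr (Or.inr (e3.mpr (Or.inr (Or.inr (Or.inr h3)))))
          have hrl : ¬ r ≤ 2 := fun h => by
            rcases (hle 2).mp h with h6 | hex
            · omega
            · rcases e2.mp hex with h | h | h
              · exact h0 h
              · exact h1 h
              · exact h2 h
          have hr3 : r = 3 := by omega
          simp only [h0, h1, h2, h3, hr3]
          simp [pvTypes]
        · by_cases h4 : (["private_key", "rsa", "ecdsa", "ssh"].any (fun k => PySem.Chars.isIn k.toList cs)) = true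
          · have hru : r ≤ 4 := (hle 4).mpr (Or.inr (e4.mpr (Or.inr (Or.inr (Or.inr (Or.inr h4))))))
            have hrl : ¬ r ≤ 3 := fun h => by
              rcases (hle 3).mp h with h6 | hex
              · omega
              · rcases e3.mp hex with h | h | h | h
                · exact h0 h
                · exact h1 h
                · exact h2 h
                · exact h3 h
            have hr4 : r = 4 := by omega
            simp only [h0, h1, h2, h3, h4, hr4]
            simp [pvTypes]
          · by_cases h5 : (["url", "ftp", "smtp", "postgresql", "sql", "mongodb"].any (fun k => PySem.Chars.isIn k.toList cs)) = true
            · have hru : r ≤ 5 := (hle 5).mpr (Or.inr (e5.mpr (Or.inr (Or.inr (Or.inr (Or.inr (Or.inr h5)))))))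
              have hrl : ¬ r ≤ 4 := fun h => by
                rcases (hle 4).mp h with h6 | hex
                · omega
                · rcases e4.mp hex with h | h | h | h | h
                  · exact h0 h
                  · exact h1 h
                  · exact h2 h
                  · exact h3 h
                  · exact h4 h
              have hr5 : r = 5 := by omega
              simp only [h0, h1, h2, h3, h4, h5, hr5]
              simp [pvTypes]
            · have hrl : ¬ r ≤ 5 := fun h => by
                rcases (hle 5).mp h with h6 | hex
                · omega
                · rcases e5.mp hex with h | h | h | h | h | h
                  · exact h0 h
                  · exact h1 h
                  · exact h2 h
                  · exact h3 h
                  · exact h4 h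
                  · exact h5 h
              have hr6 : r = 6 := by
                have : r ≤ 6 := (hle 6).mpr (Or.inl (le_refl 6))
                omega
              simp only [h0, h1, h2, h3, h4, h5, hr6]
              simp

theorem main_eq (label : String) :
    get_type_from_label label = get_type_from_label_alt label := by
  unfold get_type_from_label get_type_from_label_alt
  simp only [PySem.Str.isIn_eq, PySem.Str.toList_lower]
  exact core_eq _

-- ===== VERDICT (by name: the statement is the Claim_ definition above) =====
theorem get_type_from_label_spec : Claim_equal_get_type_from_label := by
  intro label _
  show get_type_from_label label = get_type_from_label_alt label
  exact main_eq label
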